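-- pv_equiv track=rewrite | github.com/qml2code/qml2 | qml2/multilevel_sorf/utils.py | cutoff_to_first_closing_bracket
-- ===== SOURCE A (Python) =====
-- closing_brackets = {"<": ">", "(": ")", "[": "]"}
--
-- def first_position_or_None(remainder, symbol):
--     if symbol in remainder:
--         return remainder.index(symbol)
--     else:
--         return None
--
-- def cutoff_to_first_closing_bracket(remainder):
--     comma_position = first_position_or_None(remainder, ",")
--
--     first_bracket = None
--     first_bracket_position = None
--     for bracket in closing_brackets.keys():
--         position = first_position_or_None(remainder, bracket)
--         if position is None:
--             continue
--         if (first_bracket_position is None) or (position < first_bracket_position):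
--             first_bracket = bracket
--             first_bracket_position = position
--     c = (first_bracket is not None) and (first_bracket in ["<", "["])
--     if comma_position is not None:
--         c = c and (first_bracket_position < comma_position)
--     if comma_position is None:
--         return len(remainder), c
--     if (first_bracket is None) or (comma_position < first_bracket_position):
--         return comma_position, c
--     closing_bracket = closing_brackets[first_bracket]
--     nbracks = 1
--     for i, s in enumerate(remainder[first_bracket_position + 1 :]):
--         if s == closing_bracket:
--             nbracks -= 1
--         if s == first_bracket:
--             nbracks += 1
--         if nbracks == 0:
--             return first_bracket_position + i + 2, c
-- ===== SOURCE B (Python) =====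
-- CLOSING = {"<": ">", "(": ")", "[": "]"}
--
--
-- def cutoff_to_first_closing_bracket(remainder):
--     # one left-to-right scan with a small state machine
--     comma_pos = None
--     bracket = None
--     bracket_pos = None
--     match_pos = None
--     depth = 0
--     for i, ch in enumerate(remainder):
--         if comma_pos is None and ch == ",":
--             comma_pos = i
--         if bracket is None:
--             if ch in CLOSING:
--                 bracket = ch
--                 bracket_pos = i
--                 depth = 1
--         elif match_pos is None:
--             if ch == CLOSING[bracket]:
--                 depth -= 1
--             elif ch == bracket:
--                 depth += 1
--             if depth == 0:
--                 match_pos = i + 1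
--     c = bracket in ("<", "[") and (comma_pos is None or bracket_pos < comma_pos)
--     if comma_pos is None:
--         return len(remainder), c
--     if bracket is None or comma_pos < bracket_pos:
--         return comma_pos, c
--     return match_pos, c
-- ===== Notes on version B (the rewrite author's own statement) =====
-- stated objective: alternative
-- what changed: B replaces A's repeated str.index scans (comma, three bracket kinds) plus a separate bracket-matching loop over a slice by a single left-to-right scan with a small state machine that records the first comma, the first opening bracket and its matching close in one pass.
-- outside the precondition, e.g. on cutoff_to_first_closing_bracket('a(b,c'): A returns None, B returns (None, False); on cutoff_to_first_closing_bracket('<<,>'): A returns None, B returns (None, True)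
import Mathlib
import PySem

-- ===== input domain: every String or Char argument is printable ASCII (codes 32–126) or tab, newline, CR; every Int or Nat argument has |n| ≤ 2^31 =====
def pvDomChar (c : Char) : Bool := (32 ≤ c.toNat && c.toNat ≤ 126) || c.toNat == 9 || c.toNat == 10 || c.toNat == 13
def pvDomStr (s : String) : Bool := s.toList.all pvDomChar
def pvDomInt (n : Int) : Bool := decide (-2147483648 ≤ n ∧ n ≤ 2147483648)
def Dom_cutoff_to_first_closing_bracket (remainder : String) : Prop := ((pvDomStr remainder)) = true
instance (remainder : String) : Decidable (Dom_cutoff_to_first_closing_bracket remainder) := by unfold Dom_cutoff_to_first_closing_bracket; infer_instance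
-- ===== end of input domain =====

-- B replaces A's repeated `str.index` scans plus a separate matching loop by ONE left-to-right
-- state-machine scan (objective: alternative, same asymptotic cost).
-- Where Python A returns bare None / B returns (None, c) (unmatched bracket before a comma) both
-- leave the declared type Int × Bool: those inputs are excluded by Pre_ and the ports return (0, c) there.

-- ===== PORT A =====
def closing_brackets : PySem.Dict Char Char := PySem.Dict.ofList [('<', '>'), ('(', ')'), ('[', ']')]

-- `symbol in remainder` / `remainder.index(symbol)` for a ONE-CHARACTER symbol are exactly
-- char-membership and first char index (exact on every input).
def first_position_or_None (remainder : List Char) (symbol : Char) : Option Int :=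
  if symbol ∈ remainder then (PySem.List.index? remainder symbol).map (fun n => (n : Int)) else none

-- `for i, s in enumerate(remainder[first_bracket_position+1:])` with early return
def a_loop (closing_bracket first_bracket : Char) (fbp : Int) :
    List (Int × Char) → Int → Option Int
  | [], _ => none
  | (i, s) :: rest, nbracks =>
    let nb1 := if s = closing_bracket then nbracks - 1 else nbracks
    let nb2 := if s = first_bracket then nb1 + 1 else nb1
    if nb2 = 0 then some (fbp + i + 2) else a_loop closing_bracket first_bracket fbp rest nb2

def cutoff_to_first_closing_bracket (remainder : String) : Int × Bool :=
  let l := remainder.toList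
  let comma_position := first_position_or_None l ','
  let fb := closing_brackets.keys.foldl
    (fun (st : Option Char × Option Int) bracket =>
      match first_position_or_None l bracket with
      | none => st
      | some position =>
        match st.2 with
        | none => (some bracket, some position)
        | some fbp => if position < fbp then (some bracket, some position) else st)
    (none, none)
  let first_bracket := fb.1
  let first_bracket_position := fb.2
  let c0 := first_bracket.isSome && (first_bracket == some '<' || first_bracket == some '[')
  -- `c = c and (first_bracket_position < comma_position)`: the comparison is only reached when c
  -- is True, hence first_bracket_position is not None (short-circuit `and`)
  let c := match comma_position with
    | none => c0
    | some cp => c0 && (match first_bracket_position with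
                        | some fbp => decide (fbp < cp)
                        | none => false)
  match comma_position with
  | none => ((l.length : Int), c)
  | some cp =>
    match first_bracket, first_bracket_position with
    | none, _ => (cp, c)
    | some _, none => (cp, c)  -- unreachable: first_bracket and its position are set together
    | some b, some fbp =>
      if cp < fbp then (cp, c)
      else
        -- closing_brackets[first_bracket]: b is always a key, so KeyError is impossible
        let closing_bracket := (closing_brackets.get? b).getD ' '
        match a_loop closing_bracket b fbp
            (PySem.List.enumerate (PySem.List.slice l (some (fbp + 1)) none) 0) 1 with
        | some r => (r, c)
        | none => (0, c)  -- Python A returns bare None here; excluded by Pre_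

-- ===== PORT B =====
def closingOf (b : Char) : Char := if b = '<' then '>' else if b = '(' then ')' else ']'

structure BState where
  comma : Option Int
  brk : Option Char
  brkPos : Option Int
  mtch : Option Int
  depth : Int
deriving DecidableEq, Repr

def b_step (st : BState) (ic : Int × Char) : BState :=
  let st1 := if st.comma = none ∧ ic.2 = ',' then { st with comma := some ic.1 } else st
  match st1.brk with
  | none =>
    if ic.2 = '<' ∨ ic.2 = '(' ∨ ic.2 = '[' then
      { st1 with brk := some ic.2, brkPos := some ic.1, depth := 1 }
    else st1
  | some b =>
    match st1.mtch with
    | some _ => st1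
    | none =>
      let d := if ic.2 = closingOf b then st1.depth - 1
               else if ic.2 = b then st1.depth + 1
               else st1.depth
      if d = 0 then { st1 with mtch := some (ic.1 + 1), depth := d }
      else { st1 with depth := d }

def cutoff_to_first_closing_bracket_alt (remainder : String) : Int × Bool :=
  let l := remainder.toList
  let st := (PySem.List.enumerate l 0).foldl b_step ⟨none, none, none, none, 0⟩
  let c := (st.brk == some '<' || st.brk == some '[') &&
           (st.comma.isNone ||
            (match st.brkPos, st.comma with
             | some bp, some cp => decide (bp < cp)
             | _, _ => false))
  match st.comma with
  | none => ((l.length : Int), c)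
  | some cp =>
    match st.brkPos with
    | none => (cp, c)
    | some bp =>
      if cp < bp then (cp, c)
      else (st.mtch.getD 0, c)  -- Python B returns (None, c) when unmatched; excluded by Pre_

-- ===== PRECONDITION & SPEC =====
-- Pre_ excludes exactly the inputs where A returns bare None instead of a pair (a comma exists, the
-- first bracket precedes it, and — counting only that one bracket type — it is never matched): both
-- Pythons leave the declared type Int × Bool there.
def Pre_cutoff_to_first_closing_bracket (remainder : String) : Prop :=
  let l := remainder.toList
  let ci := l.findIdx (· == ',')
  let bi := l.findIdx (fun c => c == '<' || c == '(' || c == '[')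
  ci < l.length → bi < ci →
    ∃ j < l.length - bi - 1,
      ((l.drop (bi + 1)).take (j + 1)).count (closingOf (l.getD bi ' ')) =
      ((l.drop (bi + 1)).take (j + 1)).count (l.getD bi ' ') + 1
instance (remainder : String) : Decidable (Pre_cutoff_to_first_closing_bracket remainder) := by
  unfold Pre_cutoff_to_first_closing_bracket; infer_instance

def pvWitness_cutoff_to_first_closing_bracket : String := "f(x), g"

def Spec_cutoff_to_first_closing_bracket (remainder : String) (out : Int × Bool) : Prop :=
  out = cutoff_to_first_closing_bracket_alt remainder
instance (remainder : String) (out : Int × Bool) :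
    Decidable (Spec_cutoff_to_first_closing_bracket remainder out) := by
  unfold Spec_cutoff_to_first_closing_bracket; infer_instance

-- ===== CLAIM (what is proved, stated in full; the proofs are below) =====
def Claim_equal_cutoff_to_first_closing_bracket : Prop :=
  ∀ (remainder : String), Dom_cutoff_to_first_closing_bracket remainder →
    Pre_cutoff_to_first_closing_bracket remainder →
    Spec_cutoff_to_first_closing_bracket remainder (cutoff_to_first_closing_bracket remainder)

-- ===== LEMMAS AND PROOFS =====

-- spec-level helpers (proofs only)
def isBrk (c : Char) : Bool := c == '<' || c == '(' || c == '['

def fbSpec : List Char → Option (Nat × Char)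
  | [] => none
  | c :: l => if isBrk c then some (0, c) else (fbSpec l).map (fun p => (p.1 + 1, p.2))

def scanMatch (close op : Char) : List Char → Int → Option Nat
  | [], _ => none
  | s :: rest, d =>
    let d1 := if s = close then d - 1 else d
    let d2 := if s = op then d1 + 1 else d1
    if d2 = 0 then some 0 else (scanMatch close op rest d2).map (· + 1)

lemma index?_findIdx? (l : List Char) (sym : Char) :
    PySem.List.index? l sym = List.findIdx? (· == sym) l := by
  rw [PySem.List.index?_eq_idxOf?]
  exact (Option.map_inj_right fun x y a => a).mp rfl

lemma fpn_eq (l : List Char) (sym : Char) :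
    first_position_or_None l sym = (List.findIdx? (· == sym) l).map (fun n : Nat => (n : Int)) := by
  unfold first_position_or_None
  rw [index?_findIdx?]
  by_cases hm : sym ∈ l
  · simp only [if_pos hm]
    cases hq : List.findIdx? (fun x => x == sym) l <;> simp [hq]
  · have : List.findIdx? (· == sym) l = none := by
      rw [List.findIdx?_eq_none_iff]
      intro x hx
      exact beq_eq_false_iff_ne.mpr (fun h => hm (h ▸ hx))
    simp [hm, this]

lemma foldA_eq (l : List Char) :
    (['<', '(', '['].foldl
      (fun (st : Option Char × Option Int) bracket =>
        match first_position_or_None l bracket with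
        | none => st
        | some position =>
          match st.2 with
          | none => (some bracket, some position)
          | some fbp => if position < fbp then (some bracket, some position) else st)
      (none, none))
    = ((fbSpec l).map (·.2), (fbSpec l).map (fun p => ((p.1 : Int)))) := by
  induction l with
  | nil => simp [List.foldl, fpn_eq, fbSpec]
  | cons c l ih =>
    simp only [List.foldl_cons, List.foldl_nil] at ih ⊢
    simp only [fpn_eq] at ih ⊢
    simp only [List.findIdx?_cons] at ⊢
    by_cases h1 : c = '<'
    · subst h1
      rcases hq2 : List.findIdx? (· == '(') l with _ | n2 <;>
        rcases hq3 : List.findIdx? (· == '[') l with _ | n3 <;>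
          simp [hq2, hq3, fbSpec, isBrk] <;> (try split_ifs) <;> first | rfl | omega | simp_all | skip
    · by_cases h2 : c = '('
      · subst h2
        rcases hq1 : List.findIdx? (· == '<') l with _ | n1 <;>
          rcases hq3 : List.findIdx? (· == '[') l with _ | n3 <;>
            simp [hq1, hq3, h1, fbSpec, isBrk] <;> (try split_ifs) <;> first | rfl | omega | simp_all | skip
      · by_cases h3 : c = '['
        · subst h3
          rcases hq1 : List.findIdx? (· == '<') l with _ | n1 <;>
            rcases hq2 : List.findIdx? (· == '(') l with _ | n2 <;>
              simp [hq1, hq2, h1, h2, fbSpec, isBrk] <;> (try split_ifs) <;> first | rfl | omega | simp_all | skip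
        · have hfb : fbSpec (c :: l) = (fbSpec l).map (fun p => (p.1 + 1, p.2)) := by
            simp [fbSpec, isBrk, h1, h2, h3]
          rw [hfb]
          simp only [h1, h2, h3, beq_iff_eq, if_false, reduceIte]
          rcases hq1 : List.findIdx? (· == '<') l with _ | n1 <;>
            rcases hq2 : List.findIdx? (· == '(') l with _ | n2 <;>
              rcases hq3 : List.findIdx? (· == '[') l with _ | n3 <;>
                rcases hfbl : fbSpec l with _ | ⟨p, b⟩ <;>
                  simp only [hq1, hq2, hq3, hfbl, Option.map_some, Option.map_none,
                    Option.map_map] at ih ⊢ <;>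
                  (try split_ifs at ih ⊢) <;> simp_all <;> (try push_cast) <;> (try ring) <;>
                  (try omega) <;> (try tauto) <;> (try split_ifs at ih ⊢) <;> simp_all <;>
                  (try omega) <;> (try tauto)

-- ===== B-side step facts =====
lemma b_step_comma (st : BState) (ic : Int × Char) :
    (b_step st ic).comma = if st.comma = none ∧ ic.2 = ',' then some ic.1 else st.comma := by
  unfold b_step
  by_cases h : st.comma = none ∧ ic.2 = ','
  · simp only [if_pos h]
    cases hb : st.brk <;> cases hm : st.mtch <;> simp only [hb, hm] <;> (repeat' split) <;>
      first | rfl | simp_all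
  · simp only [if_neg h]
    cases hb : st.brk <;> cases hm : st.mtch <;> simp only [hb, hm] <;> (repeat' split) <;>
      first | rfl | simp_all

lemma b_step_brk (st : BState) (ic : Int × Char) :
    (b_step st ic).brk =
      if st.brk = none ∧ (ic.2 = '<' ∨ ic.2 = '(' ∨ ic.2 = '[') then some ic.2 else st.brk := by
  unfold b_step
  by_cases h : st.comma = none ∧ ic.2 = ','
  · simp only [if_pos h]
    cases hb : st.brk <;> cases hm : st.mtch <;> simp only [hb, hm] <;> (repeat' split) <;>
      first | rfl | simp_all
  · simp only [if_neg h]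
    cases hb : st.brk <;> cases hm : st.mtch <;> simp only [hb, hm] <;> (repeat' split) <;>
      first | rfl | simp_all

lemma b_step_brkPos (st : BState) (ic : Int × Char) :
    (b_step st ic).brkPos =
      if st.brk = none ∧ (ic.2 = '<' ∨ ic.2 = '(' ∨ ic.2 = '[') then some ic.1 else st.brkPos := by
  unfold b_step
  by_cases h : st.comma = none ∧ ic.2 = ','
  · simp only [if_pos h]
    cases hb : st.brk <;> cases hm : st.mtch <;> simp only [hb, hm] <;> (repeat' split) <;>
      first | rfl | simp_all
  · simp only [if_neg h]
    cases hb : st.brk <;> cases hm : st.mtch <;> simp only [hb, hm] <;> (repeat' split) <;>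
      first | rfl | simp_all

lemma b_step_mtch_keep (st : BState) (ic : Int × Char) (v : Int) (h : st.mtch = some v) :
    (b_step st ic).mtch = some v := by
  unfold b_step
  by_cases hc : st.comma = none ∧ ic.2 = ','
  · simp only [if_pos hc]
    cases hb : st.brk <;> simp only [hb, h] <;> (repeat' split) <;> first | rfl | simp_all
  · simp only [if_neg hc]
    cases hb : st.brk <;> simp only [hb, h] <;> (repeat' split) <;> first | rfl | simp_all

-- ===== B-side fold characterizations =====
lemma foldl_comma (t : List Char) : ∀ (k : Int) (st : BState),
    ((PySem.List.enumerate t k).foldl b_step st).comma =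
      match st.comma with
      | some x => some x
      | none => (List.findIdx? (· == ',') t).map (fun n : Nat => k + (n : Int)) := by
  induction t with
  | nil =>
    intro k st
    cases hc : st.comma <;> simp [PySem.List.enumerate_nil, hc]
  | cons c t ih =>
    intro k st
    rw [PySem.List.enumerate_cons, List.foldl_cons, ih, b_step_comma]
    cases hc : st.comma with
    | some x => simp [hc]
    | none =>
      by_cases hcc : c = ','
      · simp [hc, hcc, List.findIdx?_cons]
      · rw [List.findIdx?_cons, if_neg (by simpa using hcc)]
        simp only [hc, hcc, and_false, if_false, and_true]
        cases hfi : List.findIdx? (· == ',') t <;> simp [hfi, hcc] <;> push_cast <;> ring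

lemma foldl_brk_keep (es : List (Int × Char)) : ∀ (st : BState) (b : Char), st.brk = some b →
    (es.foldl b_step st).brk = some b ∧ (es.foldl b_step st).brkPos = st.brkPos := by
  induction es with
  | nil => intro st b h; simp [h]
  | cons e es ih =>
    intro st b h
    rw [List.foldl_cons]
    have h1 : (b_step st e).brk = some b := by rw [b_step_brk]; simp [h]
    have h2 : (b_step st e).brkPos = st.brkPos := by rw [b_step_brkPos]; simp [h]
    obtain ⟨ha, hb2⟩ := ih (b_step st e) b h1
    exact ⟨ha, by rw [hb2, h2]⟩

lemma foldl_brk (t : List Char) : ∀ (k : Int) (st : BState),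
    st.brk = none →
    ((PySem.List.enumerate t k).foldl b_step st).brk = (fbSpec t).map (·.2) := by
  induction t with
  | nil => intro k st h; simp [PySem.List.enumerate_nil, fbSpec, h]
  | cons c t ih =>
    intro k st h
    rw [PySem.List.enumerate_cons, List.foldl_cons]
    by_cases hP : c = '<' ∨ c = '(' ∨ c = '['
    · have hb1 : (b_step st (k, c)).brk = some c := by rw [b_step_brk]; simp [h, hP]
      rw [(foldl_brk_keep _ _ c hb1).1]
      have hiB : isBrk c = true := by simp [isBrk]; tauto
      simp [fbSpec, hiB]
    · have hb1 : (b_step st (k, c)).brk = none := by rw [b_step_brk]; simp [h, hP]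
      rw [ih (k + 1) _ hb1]
      have hiB : isBrk c = false := by simp [isBrk]; tauto
      cases hfb : fbSpec t <;> simp [fbSpec, hiB, hfb]

lemma foldl_brkPos (t : List Char) : ∀ (k : Int) (st : BState),
    st.brk = none → st.brkPos = none →
    ((PySem.List.enumerate t k).foldl b_step st).brkPos =
      (fbSpec t).map (fun p => k + (p.1 : Int)) := by
  induction t with
  | nil => intro k st h hpos; simp [PySem.List.enumerate_nil, fbSpec, hpos]
  | cons c t ih =>
    intro k st h hpos
    rw [PySem.List.enumerate_cons, List.foldl_cons]
    by_cases hP : c = '<' ∨ c = '(' ∨ c = '['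
    · have hb1 : (b_step st (k, c)).brk = some c := by rw [b_step_brk]; simp [h, hP]
      have hp1 : (b_step st (k, c)).brkPos = some k := by rw [b_step_brkPos]; simp [h, hP]
      rw [(foldl_brk_keep _ _ c hb1).2, hp1]
      have hiB : isBrk c = true := by simp [isBrk]; tauto
      simp [fbSpec, hiB]
    · have hb1 : (b_step st (k, c)).brk = none := by rw [b_step_brk]; simp [h, hP]
      have hp1 : (b_step st (k, c)).brkPos = none := by rw [b_step_brkPos]; simp [h, hP, hpos]
      rw [ih (k + 1) _ hb1 hp1]
      have hiB : isBrk c = false := by simp [isBrk]; tauto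
      cases hfb : fbSpec t <;> simp [fbSpec, hiB, hfb] <;> push_cast <;> ring

lemma foldl_mtch_keep (es : List (Int × Char)) : ∀ (st : BState) (v : Int), st.mtch = some v →
    (es.foldl b_step st).mtch = some v := by
  induction es with
  | nil => intro st v h; simpa using h
  | cons e es ih =>
    intro st v h
    rw [List.foldl_cons]
    exact ih _ v (b_step_mtch_keep st e v h)

lemma b_step_run (st : BState) (ic : Int × Char) (b : Char)
    (hb : st.brk = some b) (hm : st.mtch = none) :
    b_step st ic =
      { st with
        comma := if st.comma = none ∧ ic.2 = ',' then some ic.1 else st.comma,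
        mtch := if (if ic.2 = closingOf b then st.depth - 1
                    else if ic.2 = b then st.depth + 1 else st.depth) = 0
                then some (ic.1 + 1) else none,
        depth := if ic.2 = closingOf b then st.depth - 1
                 else if ic.2 = b then st.depth + 1 else st.depth } := by
  unfold b_step
  by_cases h : st.comma = none ∧ ic.2 = ','
  all_goals try simp [h, hb, hm]
  all_goals repeat' split
  all_goals try rfl
  all_goals try (rw [← hm])
  all_goals try (rw [← hb])
  all_goals simp_all

lemma b_step_nobrk (st : BState) (ic : Int × Char)
    (hb : st.brk = none) (hP : ¬(ic.2 = '<' ∨ ic.2 = '(' ∨ ic.2 = '[')) :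
    b_step st ic =
      { st with comma := if st.comma = none ∧ ic.2 = ',' then some ic.1 else st.comma } := by
  unfold b_step
  by_cases h : st.comma = none ∧ ic.2 = ','
  all_goals try simp [h, hb]
  all_goals repeat' split
  all_goals try rfl
  all_goals try (rw [← hb])
  all_goals simp_all

lemma foldl_mtch_run (t : List Char) : ∀ (k : Int) (st : BState) (b : Char),
    st.brk = some b → st.mtch = none → closingOf b ≠ b →
    ((PySem.List.enumerate t k).foldl b_step st).mtch =
      (scanMatch (closingOf b) b t st.depth).map (fun j => k + j + 1) := by
  induction t with
  | nil => intro k st b hb hm hne; simp [PySem.List.enumerate_nil, scanMatch, hm]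
  | cons c t ih =>
    intro k st b hb hm hne
    rw [PySem.List.enumerate_cons, List.foldl_cons, b_step_run st (k, c) b hb hm]
    have hdd : (if c = b then (if c = closingOf b then st.depth - 1 else st.depth) + 1
                else (if c = closingOf b then st.depth - 1 else st.depth)) =
               (if c = closingOf b then st.depth - 1
                else if c = b then st.depth + 1 else st.depth) := by
      by_cases h1 : c = closingOf b <;> by_cases h2 : c = b
      · exact absurd (h1.symm.trans h2) hne
      all_goals try simp [h1, h2]
      all_goals try (simp [Ne.symm hne])
      all_goals try (exact fun hcb => absurd hcb hne)
    have hsm : scanMatch (closingOf b) b (c :: t) st.depth =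
        (if (if c = closingOf b then st.depth - 1
             else if c = b then st.depth + 1 else st.depth) = 0 then some 0
         else (scanMatch (closingOf b) b t
                (if c = closingOf b then st.depth - 1
                 else if c = b then st.depth + 1 else st.depth)).map (· + 1)) := by
      simp only [scanMatch]
      rw [hdd]
    rw [hsm]
    by_cases h0 : (if c = closingOf b then st.depth - 1
                   else if c = b then st.depth + 1 else st.depth) = 0
    · simp only [h0, if_pos, if_true, reduceIte]
      rw [foldl_mtch_keep _ _ (k + 1) rfl]
      simp
    · simp only [h0, if_false, reduceIte]
      rw [ih (k + 1) _ b (by simp [hb]) rfl hne]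
      simp only []
      cases hr : scanMatch (closingOf b) b t
          (if c = closingOf b then st.depth - 1
           else if c = b then st.depth + 1 else st.depth) <;>
        simp [hr] <;> push_cast <;> ring

lemma foldl_nobrk (t : List Char) : ∀ (k : Int) (st : BState),
    (∀ c ∈ t, isBrk c = false) → st.brk = none →
    (PySem.List.enumerate t k).foldl b_step st =
      { st with comma := match st.comma with
                         | some x => some x
                         | none => (List.findIdx? (· == ',') t).map (fun n : Nat => k + (n : Int)) } := by
  induction t with
  | nil =>
    intro k st _ _
    rw [PySem.List.enumerate_nil]
    cases hc : st.comma <;> simp only [List.foldl_nil, hc, List.findIdx?_nil, Option.map_none] <;>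
      rw [← hc]
  | cons c t ih =>
    intro k st hall hb
    have hPc : ¬(c = '<' ∨ c = '(' ∨ c = '[') := by
      have := hall c (by simp)
      simp [isBrk] at this
      tauto
    rw [PySem.List.enumerate_cons, List.foldl_cons, b_step_nobrk st (k, c) hb hPc,
      ih (k + 1) _ (fun x hx => hall x (by simp [hx])) (by simp [hb])]
    cases hc : st.comma with
    | some x => simp [hc]
    | none =>
      by_cases hcc : c = ','
      · simp [hc, hcc, List.findIdx?_cons]
      · rw [List.findIdx?_cons, if_neg (by simpa using hcc)]
        simp only [hc, hcc, and_false, if_false, and_true]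
        cases hfi : List.findIdx? (· == ',') t <;> simp [hfi, hcc] <;> push_cast <;> ring

-- ===== A-side loop vs scanMatch =====
lemma a_loop_eq (t : List Char) : ∀ (k : Int) (nb : Int) (close op : Char) (fbp : Int),
    a_loop close op fbp (PySem.List.enumerate t k) nb =
      (scanMatch close op t nb).map (fun j => fbp + (k + j) + 2) := by
  induction t with
  | nil => intro k nb close op fbp; simp [PySem.List.enumerate_nil, a_loop, scanMatch]
  | cons c t ih =>
    intro k nb close op fbp
    rw [PySem.List.enumerate_cons]
    rw [a_loop, scanMatch]
    by_cases h0 : (if c = op then (if c = close then nb - 1 else nb) + 1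
                   else (if c = close then nb - 1 else nb)) = 0
    · simp only [h0, if_true, reduceIte]
      simp
    · simp only [h0, if_false, reduceIte, ih]
      cases hsm : scanMatch close op t ((if c = op then (if c = close then nb - 1 else nb) + 1
                   else (if c = close then nb - 1 else nb))) <;> simp [hsm] <;> push_cast <;> ring

-- ===== fbSpec facts =====
lemma fbSpec_split (l : List Char) : ∀ (p : Nat) (b : Char), fbSpec l = some (p, b) →
    ∃ pre suf, l = pre ++ b :: suf ∧ pre.length = p ∧
      (∀ c ∈ pre, isBrk c = false) ∧ isBrk b = true := by
  induction l with
  | nil => intro p b h; simp [fbSpec] at h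
  | cons c l ih =>
    intro p b h
    by_cases hc : isBrk c = true
    · simp [fbSpec, hc] at h
      exact ⟨[], l, by simp [h.2], by simp [h.1], by simp, h.2 ▸ hc⟩
    · rw [fbSpec, if_neg (by simp [hc])] at h
      rcases hfb : fbSpec l with _ | ⟨p', b'⟩
      · simp [hfb] at h
      · rw [hfb] at h
        simp only [Option.map_some, Option.some.injEq, Prod.mk.injEq] at h
        obtain ⟨hp, hb'⟩ := h
        subst hb'
        obtain ⟨pre, suf, hl, hlen, hpre, hbrk⟩ := ih p' b' hfb
        refine ⟨c :: pre, suf, by simp [hl], by simp [hlen, hp], ?_, hbrk⟩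
        intro x hx
        rcases List.mem_cons.mp hx with h | h
        · subst h; simpa using hc
        · exact hpre x h

lemma closing_get (b : Char) (hb : isBrk b = true) :
    (closing_brackets.get? b).getD ' ' = closingOf b := by
  have h' : (b = '<' ∨ b = '(') ∨ b = '[' := by simpa [isBrk, or_assoc] using hb
  rcases h' with (h | h) | h <;> subst h <;> decide

lemma closingOf_ne (b : Char) (hb : isBrk b = true) : closingOf b ≠ b := by
  have h' : (b = '<' ∨ b = '(') ∨ b = '[' := by simpa [isBrk, or_assoc] using hb
  rcases h' with (h | h) | h <;> subst h <;> decide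

lemma brk_ne_comma (b : Char) (hb : isBrk b = true) : b ≠ ',' := by
  have h' : (b = '<' ∨ b = '(') ∨ b = '[' := by simpa [isBrk, or_assoc] using hb
  rcases h' with (h | h) | h <;> subst h <;> decide

-- ===== main equivalence =====
lemma ports_eq (remainder : String) :
    cutoff_to_first_closing_bracket remainder = cutoff_to_first_closing_bracket_alt remainder := by
  unfold cutoff_to_first_closing_bracket cutoff_to_first_closing_bracket_alt
  have hkeys : closing_brackets.keys = ['<', '(', '['] := rfl
  simp only [hkeys]
  rw [foldA_eq]
  simp only [fpn_eq]
  set l := remainder.toList with hldef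
  set st := (PySem.List.enumerate l 0).foldl b_step
    (⟨none, none, none, none, 0⟩ : BState) with hst
  have hcomma : st.comma =
      (List.findIdx? (· == ',') l).map (fun n : Nat => (n : Int)) := by
    rw [hst, foldl_comma]
    simp
  have hbrk : st.brk = (fbSpec l).map (·.2) := by
    rw [hst]; exact foldl_brk l 0 _ rfl
  have hpos : st.brkPos = (fbSpec l).map (fun p => ((p.1 : Int))) := by
    rw [hst, foldl_brkPos l 0 _ rfl rfl]
    simp
  rcases hfb : fbSpec l with _ | ⟨p, b⟩
  · -- no bracket anywhere
    simp only [hfb, Option.map_none] at hbrk hpos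
    rcases hco : List.findIdx? (· == ',') l with _ | ci <;>
      simp [hfb, hco, hcomma, hbrk, hpos]
  · -- first bracket b at position p
    obtain ⟨pre, suf, hsplit, hlen, hpre, hbrkb⟩ := fbSpec_split l p b hfb
    simp only [hfb, Option.map_some] at hbrk hpos
    have hmtch : st.mtch =
        (scanMatch (closingOf b) b suf 1).map (fun j => (p : Int) + j + 2) := by
      rw [hst, hsplit, PySem.List.enumerate_append, List.foldl_append,
        foldl_nobrk pre 0 _ hpre rfl, PySem.List.enumerate_cons, List.foldl_cons]
      have hstep : b_step
          { comma := (match (none : Option Int) with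
                      | some x => some x
                      | none => (List.findIdx? (· == ',') pre).map (fun n : Nat => (0 : Int) + (n : Int))),
            brk := none, brkPos := none, mtch := none, depth := 0 }
          ((0 : Int) + (pre.length : Int), b) =
          { comma := (match (none : Option Int) with
                      | some x => some x
                      | none => (List.findIdx? (· == ',') pre).map (fun n : Nat => (0 : Int) + (n : Int))),
            brk := some b, brkPos := some ((0 : Int) + (pre.length : Int)), mtch := none,
            depth := 1 } := by
        unfold b_step
        have hbc : b ≠ ',' := brk_ne_comma b hbrkb
        have hbP : b = '<' ∨ b = '(' ∨ b = '[' := by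
          have := hbrkb; simp [isBrk] at this; tauto
        simp [hbc, hbP]
      rw [hstep, foldl_mtch_run suf _ _ b rfl rfl (closingOf_ne b hbrkb)]
      simp only []
      cases hsm : scanMatch (closingOf b) b suf 1 <;> simp [hsm, hlen] <;> push_cast <;> ring
    -- the closing bracket lookup and the sliced suffix on the A side
    have hget : (closing_brackets.get? b).getD ' ' = closingOf b := closing_get b hbrkb
    have hdrop : PySem.List.slice l (some ((p : Int) + 1)) none = suf := by
      have h1 : ((p : Int) + 1) = ((p + 1 : Nat) : Int) := by push_cast; ring
      rw [h1, PySem.List.slice_from_natCast]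
      have h2 : l = (pre ++ [b]) ++ suf := by simp [hsplit]
      rw [h2, List.drop_left' (by simp [hlen])]
    have haloop : ∀ c : Bool,
        (match a_loop (closingOf b) b (p : Int) (PySem.List.enumerate suf 0) 1 with
          | some r => ((r : Int), c)
          | none => ((0 : Int), c)) =
        ((scanMatch (closingOf b) b suf 1).map (fun j => (p : Int) + j + 2) |>.getD 0, c) := by
      intro c
      rw [a_loop_eq]
      cases hsm : scanMatch (closingOf b) b suf 1 <;> simp [hsm] <;> push_cast <;> ring
    rcases hco : List.findIdx? (· == ',') l with _ | ci <;>
      simp only [hco, Option.map_some, Option.map_none] at hcomma <;>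
      simp [hfb, hco, hcomma, hbrk, hpos, hmtch, hget, hdrop, haloop]
-- ===== VERDICT (by name: the statement is the Claim_ definition above) =====
theorem cutoff_to_first_closing_bracket_spec : Claim_equal_cutoff_to_first_closing_bracket := by
  intro remainder _ _
  unfold Spec_cutoff_to_first_closing_bracket
  exact ports_eq remainder
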